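-- pv_equiv track=rewrite | github.com/ZhengYuhaoBUPT/scData | eval/common_eval_utils.py | replace_last_assistant_answer
-- ===== SOURCE A (Python) =====
-- from typing import Dict, Iterable, List, Optional, Sequence, Tuple
--
-- def replace_last_assistant_answer(conversations: Sequence[Dict], new_answer: str) -> List[Dict]:
--     updated = []
--     replaced = False
--     for turn in reversed(conversations):
--         if not replaced and turn.get("from") == "gpt":
--             updated.append({"from": "gpt", "value": new_answer})
--             replaced = True
--         else:
--             updated.append(dict(turn))
--     if not replaced:
--         raise ValueError("Conversation has no assistant answer to replace")
--     updated.reverse()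
--     return updated
-- ===== SOURCE B (Python) =====
-- def replace_last_assistant_answer(conversations, new_answer):
--     idx = None
--     for i, turn in enumerate(conversations):
--         if turn.get("from") == "gpt":
--             idx = i
--     if idx is None:
--         raise ValueError("Conversation has no assistant answer to replace")
--     head = [dict(t) for t in conversations[:idx]]
--     tail = [dict(t) for t in conversations[idx + 1:]]
--     return head + [{"from": "gpt", "value": new_answer}] + tail
-- ===== Notes on version B (the rewrite author's own statement) =====
-- stated objective: alternative
-- what changed: Replaces the reversed single pass with a 'replaced' flag and a final list reversal by an index-first scheme: one forward scan records the index of the last assistant turn, then the output is assembled as copied-prefix + replacement + copied-suffix via slicing.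
import Mathlib
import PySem

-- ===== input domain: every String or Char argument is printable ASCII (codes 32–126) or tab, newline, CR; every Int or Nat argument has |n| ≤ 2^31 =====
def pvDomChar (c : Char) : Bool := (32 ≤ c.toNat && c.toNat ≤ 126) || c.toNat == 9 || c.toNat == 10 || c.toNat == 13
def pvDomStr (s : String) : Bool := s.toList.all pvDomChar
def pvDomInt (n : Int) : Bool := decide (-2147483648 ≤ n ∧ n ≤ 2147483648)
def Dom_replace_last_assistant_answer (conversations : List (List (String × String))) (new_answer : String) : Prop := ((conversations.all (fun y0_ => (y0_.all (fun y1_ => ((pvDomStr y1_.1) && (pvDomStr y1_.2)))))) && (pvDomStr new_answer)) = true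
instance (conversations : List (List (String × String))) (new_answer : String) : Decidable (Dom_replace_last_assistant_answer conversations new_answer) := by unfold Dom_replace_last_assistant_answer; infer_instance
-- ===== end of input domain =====

-- B replaces A's reversed pass + 'replaced' flag + final reverse by an index-first scheme
-- (forward scan for the last assistant index, then prefix + replacement + suffix); same cost,
-- different decomposition. Equivalence of the RETURN value on inputs where A returns (Pre_).

-- turn.get("from") == "gpt"  (first-match lookup on the association list, per the dict convention)
def pvIsGpt (turn : List (String × String)) : Bool :=
  (PySem.Dict.mk turn).get? "from" == some "gpt"

-- ===== PORT A =====
-- loop 'for turn in reversed(conversations)' with state (updated, replaced); dict(turn) copies the dict (identity on the value).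
def replace_last_assistant_answer (conversations : List (List (String × String))) (new_answer : String) : List (List (String × String)) :=
  let st := conversations.reverse.foldl
    (fun (p : List (List (String × String)) × Bool) turn =>
      if !p.2 && pvIsGpt turn then (p.1 ++ [[("from", "gpt"), ("value", new_answer)]], true)
      else (p.1 ++ [turn], p.2))
    ([], false)
  -- 'if not replaced: raise ValueError' — excluded by Pre_; the port just returns
  st.1.reverse

-- ===== PORT B =====
-- forward scan keeping the last index whose turn has from == 'gpt'
def pvLastGptIdx (conversations : List (List (String × String))) : Option Int :=
  (PySem.List.enumerate conversations 0).foldl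
    (fun acc p => if pvIsGpt p.2 then some p.1 else acc) none

def replace_last_assistant_answer_alt (conversations : List (List (String × String))) (new_answer : String) : List (List (String × String)) :=
  match pvLastGptIdx conversations with
  | none => []   -- 'raise ValueError' — excluded by Pre_
  | some k =>
      PySem.List.slice conversations none (some k)
        ++ [[("from", "gpt"), ("value", new_answer)]]
        ++ PySem.List.slice conversations (some (k + 1)) none

-- ===== PRECONDITION & SPEC =====
-- Pre_ excludes exactly the inputs with no assistant ('gpt') turn, where A raises ValueError (B raises too).
def Pre_replace_last_assistant_answer (conversations : List (List (String × String))) (new_answer : String) : Prop :=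
  ∃ turn ∈ conversations, pvIsGpt turn = true
instance (conversations : List (List (String × String))) (new_answer : String) : Decidable (Pre_replace_last_assistant_answer conversations new_answer) := by unfold Pre_replace_last_assistant_answer; infer_instance

def pvWitness_replace_last_assistant_answer : (List (List (String × String))) × String :=
  ([[("from", "human"), ("value", "hi")], [("from", "gpt"), ("value", "old")]], "new")

def Spec_replace_last_assistant_answer (conversations : List (List (String × String))) (new_answer : String) (out : List (List (String × String))) : Prop := out = replace_last_assistant_answer_alt conversations new_answer
instance (conversations : List (List (String × String))) (new_answer : String) (out : List (List (String × String))) : Decidable (Spec_replace_last_assistant_answer conversations new_answer out) := by unfold Spec_replace_last_assistant_answer; infer_instance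

-- ===== CLAIM (what is proved, stated in full; the proofs are below) =====
def Claim_equal_replace_last_assistant_answer : Prop := ∀ (conversations : List (List (String × String))) (new_answer : String), Dom_replace_last_assistant_answer conversations new_answer → Pre_replace_last_assistant_answer conversations new_answer → Spec_replace_last_assistant_answer conversations new_answer (replace_last_assistant_answer conversations new_answer)

-- ===== LEMMAS AND PROOFS =====

-- A's loop once 'replaced' is true: every remaining turn is just copied.
lemma foldlA_replaced (na : String) (l : List (List (String × String)))
    (acc : List (List (String × String))) :
    l.foldl (fun (p : List (List (String × String)) × Bool) turn =>
        if !p.2 && pvIsGpt turn then (p.1 ++ [[("from", "gpt"), ("value", na)]], true)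
        else (p.1 ++ [turn], p.2)) (acc, true) = (acc ++ l, true) := by
  induction l generalizing acc with
  | nil => simp
  | cons x xs ih =>
      simp only [List.foldl_cons, Bool.not_true, Bool.false_and, Bool.false_eq_true, if_false]
      rw [ih]; simp

-- A's loop while not replaced, over turns with no 'gpt': every turn copied, flag stays false.
lemma foldlA_noGpt (na : String) (l : List (List (String × String)))
    (acc : List (List (String × String))) (h : ∀ u ∈ l, pvIsGpt u = false) :
    l.foldl (fun (p : List (List (String × String)) × Bool) turn =>
        if !p.2 && pvIsGpt turn then (p.1 ++ [[("from", "gpt"), ("value", na)]], true)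
        else (p.1 ++ [turn], p.2)) (acc, false) = (acc ++ l, false) := by
  induction l generalizing acc with
  | nil => simp
  | cons x xs ih =>
      have hx := h x (by simp)
      simp only [List.foldl_cons, hx, Bool.not_false, Bool.true_and, Bool.false_eq_true,
        if_false]
      rw [ih _ (fun u hu => h u (by simp [hu]))]
      simp

-- A on the last-gpt decomposition p ++ t :: s.
lemma portA_char (na : String) (p s : List (List (String × String)))
    (t : List (String × String)) (ht : pvIsGpt t = true)
    (hs : ∀ u ∈ s, pvIsGpt u = false) :
    replace_last_assistant_answer (p ++ t :: s) na
      = p ++ [("from", "gpt"), ("value", na)] :: s := by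
  unfold replace_last_assistant_answer
  have hrev : (p ++ t :: s).reverse = s.reverse ++ t :: p.reverse := by simp
  rw [hrev, List.foldl_append,
    foldlA_noGpt na s.reverse [] (fun u hu => hs u (List.mem_reverse.mp hu))]
  simp only [List.foldl_cons, ht, Bool.not_false, Bool.true_and, if_true]
  rw [foldlA_replaced]
  simp

-- B's scan over turns with no 'gpt' leaves the accumulator unchanged.
lemma foldlB_noGpt (l : List (List (String × String))) (i : Int) (acc : Option Int)
    (h : ∀ u ∈ l, pvIsGpt u = false) :
    (PySem.List.enumerate l i).foldl
      (fun acc p => if pvIsGpt p.2 then some p.1 else acc) acc = acc := by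
  induction l generalizing i acc with
  | nil => simp [PySem.List.enumerate_nil]
  | cons x xs ih =>
      rw [PySem.List.enumerate_cons]
      simp only [List.foldl_cons, h x (by simp), Bool.false_eq_true, if_false]
      exact ih _ _ (fun u hu => h u (by simp [hu]))

-- B's index on the last-gpt decomposition.
lemma lastGptIdx_char (p s : List (List (String × String)))
    (t : List (String × String)) (ht : pvIsGpt t = true)
    (hs : ∀ u ∈ s, pvIsGpt u = false) :
    pvLastGptIdx (p ++ t :: s) = some (p.length : Int) := by
  unfold pvLastGptIdx
  rw [PySem.List.enumerate_append, List.foldl_append, PySem.List.enumerate_cons]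
  simp only [List.foldl_cons, ht, if_true]
  rw [foldlB_noGpt _ _ _ hs]
  simp

lemma portB_char (na : String) (p s : List (List (String × String)))
    (t : List (String × String)) (ht : pvIsGpt t = true)
    (hs : ∀ u ∈ s, pvIsGpt u = false) :
    replace_last_assistant_answer_alt (p ++ t :: s) na
      = p ++ [("from", "gpt"), ("value", na)] :: s := by
  unfold replace_last_assistant_answer_alt
  rw [lastGptIdx_char p s t ht hs]
  dsimp only
  have h1 : ((p.length : Int) + 1) = ((p.length + 1 : Nat) : Int) := by push_cast; ring
  rw [h1, PySem.List.slice_to_natCast, PySem.List.slice_from_natCast]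
  have htake : (p ++ t :: s).take p.length = p := List.take_left ..
  have hdrop : (p ++ t :: s).drop (p.length + 1) = s := by
    rw [show p.length + 1 = p.length + 1 from rfl, ← List.drop_drop, List.drop_left]
    simp
  rw [htake, hdrop]
  simp

-- every list containing a 'gpt' turn splits at its LAST 'gpt' turn
lemma exists_last_decomp (cs : List (List (String × String)))
    (h : ∃ t ∈ cs, pvIsGpt t = true) :
    ∃ p t s, cs = p ++ t :: s ∧ pvIsGpt t = true ∧ ∀ u ∈ s, pvIsGpt u = false := by
  induction cs using List.reverseRecOn with
  | nil => simp at h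
  | append_singleton xs u ih =>
      by_cases hu : pvIsGpt u = true
      · exact ⟨xs, u, [], by simp, hu, by simp⟩
      · obtain ⟨t, ht, hgt⟩ := h
        rcases List.mem_append.mp ht with h1 | h2
        · obtain ⟨p, t', s, hcs, hgt', hs⟩ := ih ⟨t, h1, hgt⟩
          refine ⟨p, t', s ++ [u], by rw [hcs]; simp, hgt', ?_⟩
          intro v hv
          rcases List.mem_append.mp hv with hv1 | hv2
          · exact hs v hv1
          · simp at hv2; subst hv2; simpa using hu
        · simp at h2; subst h2; exact absurd hgt hu

-- ===== VERDICT (by name: the statement is the Claim_ definition above) =====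
theorem replace_last_assistant_answer_spec : Claim_equal_replace_last_assistant_answer := by
  intro cs na _dom hpre
  obtain ⟨p, t, s, hcs, hgt, hs⟩ := exists_last_decomp cs hpre
  subst hcs
  unfold Spec_replace_last_assistant_answer
  rw [portA_char na p s t hgt hs, portB_char na p s t hgt hs]
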